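-- pv_equiv track=rewrite | github.com/naveenmuj/nearShop | nearshop-api/app/ai/router.py | _dedupe_query_parts
-- ===== SOURCE A (Python) =====
-- def _dedupe_query_parts(parts: list[str | None]) -> list[str]:
--     normalized_seen: set[str] = set()
--     deduped: list[str] = []
--     for part in parts:
--         if not part:
--             continue
--         text = str(part).strip()
--         if not text:
--             continue
--         key = text.lower()
--         if key in normalized_seen:
--             continue
--         key_tokens = {token for token in key.split() if token}
--         redundant = False
--         for existing in deduped:
--             existing_key = existing.lower()
--             existing_tokens = {token for token in existing_key.split() if token}
--             if key == existing_key: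
--                 redundant = True
--                 break
--             if len(key_tokens) == 1 and key_tokens.issubset(existing_tokens):
--                 redundant = True
--                 break
--             if len(existing_tokens) == 1 and existing_tokens.issubset(key_tokens):
--                 redundant = True
--                 break
--         if redundant:
--             continue
--         normalized_seen.add(key)
--         deduped.append(text)
--     return deduped
-- ===== SOURCE B (Python) =====
-- def _dedupe_query_parts(parts):
--     normalized_seen = set()
--     deduped = []
--     all_tokens = set()      # every token of every kept entry
--     single_tokens = set()   # tokens of kept single-token entries
--     for part in parts:
--         if not part:
--             continue
--         text = str(part).strip()
--         if not text:
--             continue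
--         key = text.lower()
--         if key in normalized_seen:
--             continue
--         toks = {t for t in key.split() if t}
--         if len(toks) == 1 and next(iter(toks)) in all_tokens:
--             continue
--         if toks & single_tokens:
--             continue
--         normalized_seen.add(key)
--         deduped.append(text)
--         all_tokens |= toks
--         if len(toks) == 1:
--             single_tokens |= toks
--     return deduped
-- ===== Notes on version B (the rewrite author's own statement) =====
-- stated objective: faster
-- what changed: Replaced A's inner rescan of all kept entries (re-tokenizing each on every candidate) with two running sets - all kept tokens and tokens of kept single-token entries - so each candidate is decided by O(#tokens) set lookups.
import Mathlib
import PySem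

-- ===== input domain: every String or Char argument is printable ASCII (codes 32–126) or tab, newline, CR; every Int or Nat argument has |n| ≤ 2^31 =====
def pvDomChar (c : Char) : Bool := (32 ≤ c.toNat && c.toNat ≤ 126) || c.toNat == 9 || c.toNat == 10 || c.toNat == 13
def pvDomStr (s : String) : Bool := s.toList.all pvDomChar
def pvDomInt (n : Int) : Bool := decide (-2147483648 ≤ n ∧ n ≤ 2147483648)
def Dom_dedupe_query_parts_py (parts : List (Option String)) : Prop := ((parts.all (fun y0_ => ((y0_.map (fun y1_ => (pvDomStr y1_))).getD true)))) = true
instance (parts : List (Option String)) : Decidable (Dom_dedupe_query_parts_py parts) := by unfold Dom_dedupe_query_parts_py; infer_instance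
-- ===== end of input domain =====

-- B replaces A's inner rescan of all kept entries by two running token sets (objective: faster).

-- ===== PORT A =====
-- {token for token in key.split() if token}  (this comprehension appears verbatim in both Pythons)
def pvTokens (key : String) : PySem.Set String :=
  PySem.Set.ofList ((PySem.Str.split₀ key).filter (fun t => t != ""))

-- A's inner 'for existing in deduped' loop with its breaks
def pvRedundantA (key : String) (keyTokens : PySem.Set String) : List String → Bool
  | [] => false
  | existing :: rest =>
    let existingKey := PySem.Str.lower existing
    let existingTokens := pvTokens existingKey
    if key = existingKey then true
    else if keyTokens.length = 1 ∧ PySem.Set.issubset keyTokens existingTokens = true then true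
    else if existingTokens.length = 1 ∧ PySem.Set.issubset existingTokens keyTokens = true then true
    else pvRedundantA key keyTokens rest

def pvStepA (st : PySem.Set String × List String) (part : Option String) :
    PySem.Set String × List String :=
  match part with
  | none => st           -- 'if not part: continue' (None)
  | some p =>
    if p = "" then st    -- 'if not part: continue' (empty string)
    else
      let text := PySem.Str.strip p
      if text = "" then st
      else
        let key := PySem.Str.lower text
        if PySem.Set.contains st.1 key = true then st
        else
          let keyTokens := pvTokens key
          if pvRedundantA key keyTokens st.2 = true then st
          else (PySem.Set.add st.1 key, st.2 ++ [text])

def dedupe_query_parts_py (parts : List (Option String)) : List String :=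
  (parts.foldl pvStepA (PySem.Set.empty, [])).2

-- ===== PORT B =====
-- state: (normalized_seen, deduped, all_tokens, single_tokens)
def pvStepB (st : PySem.Set String × List String × PySem.Set String × PySem.Set String)
    (part : Option String) :
    PySem.Set String × List String × PySem.Set String × PySem.Set String :=
  match part with
  | none => st
  | some p =>
    if p = "" then st
    else
      let text := PySem.Str.strip p
      if text = "" then st
      else
        let key := PySem.Str.lower text
        if PySem.Set.contains st.1 key = true then st
        else
          let toks := pvTokens key
          -- 'len(toks) == 1 and next(iter(toks)) in all_tokens'
          if toks.length = 1 ∧ PySem.Set.contains st.2.2.1 (toks.headD "") = true then st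
          -- 'if toks & single_tokens:'  (truthiness of the intersection)
          else if PySem.Set.inter toks st.2.2.2 ≠ [] then st
          else (PySem.Set.add st.1 key, st.2.1 ++ [text],
                PySem.Set.update st.2.2.1 toks,
                if toks.length = 1 then PySem.Set.update st.2.2.2 toks else st.2.2.2)

def dedupe_query_parts_py_alt (parts : List (Option String)) : List String :=
  (parts.foldl pvStepB (PySem.Set.empty, [], PySem.Set.empty, PySem.Set.empty)).2.1

-- ===== PRECONDITION & SPEC =====
def Spec_dedupe_query_parts_py (parts : List (Option String)) (out : List String) : Prop := out = dedupe_query_parts_py_alt parts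
instance (parts : List (Option String)) (out : List String) : Decidable (Spec_dedupe_query_parts_py parts out) := by unfold Spec_dedupe_query_parts_py; infer_instance

-- ===== CLAIM (what is proved, stated in full; the proofs are below) =====
def Claim_equal_dedupe_query_parts_py : Prop := ∀ (parts : List (Option String)), Dom_dedupe_query_parts_py parts → Spec_dedupe_query_parts_py parts (dedupe_query_parts_py parts)

-- ===== LEMMAS AND PROOFS =====

-- The invariant linking B's two extra sets to A's deduped list
def pvInv (seen : PySem.Set String) (ded : List String)
    (allT singleT : PySem.Set String) : Prop :=
  seen = ded.map PySem.Str.lower ∧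
  (∀ t, t ∈ allT ↔ ∃ e ∈ ded, t ∈ pvTokens (PySem.Str.lower e)) ∧
  (∀ t, t ∈ singleT ↔ ∃ e ∈ ded, pvTokens (PySem.Str.lower e) = [t])

lemma pvRedundantA_iff (key : String) (ktoks : PySem.Set String) (l : List String) :
    pvRedundantA key ktoks l = true ↔
      ∃ e ∈ l, key = PySem.Str.lower e ∨
        (ktoks.length = 1 ∧ PySem.Set.issubset ktoks (pvTokens (PySem.Str.lower e)) = true) ∨
        ((pvTokens (PySem.Str.lower e)).length = 1 ∧
          PySem.Set.issubset (pvTokens (PySem.Str.lower e)) ktoks = true) := by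
  induction l with
  | nil => simp [pvRedundantA]
  | cons x xs ih =>
    simp only [pvRedundantA]
    split_ifs with h1 h2 h3
    · exact iff_of_true rfl ⟨x, List.mem_cons_self .., Or.inl h1⟩
    · exact iff_of_true rfl ⟨x, List.mem_cons_self .., Or.inr (Or.inl h2)⟩
    · exact iff_of_true rfl ⟨x, List.mem_cons_self .., Or.inr (Or.inr h3)⟩
    · rw [ih]
      constructor
      · rintro ⟨e, he, h⟩; exact ⟨e, List.mem_cons_of_mem _ he, h⟩
      · rintro ⟨e, he, h⟩
        rcases List.mem_cons.mp he with rfl | he'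
        · rcases h with h | h | h
          · exact absurd h h1
          · exact absurd h h2
          · exact absurd h h3
        · exact ⟨e, he', h⟩

lemma pvSingleton_subset_iff (s t : PySem.Set String) (hs : s.length = 1) :
    PySem.Set.issubset s t = true ↔ s.headD "" ∈ t := by
  rcases List.length_eq_one_iff.mp hs with ⟨a, rfl⟩
  simp [PySem.Set.issubset_iff]

-- B's two membership tests decide exactly A's inner loop, under the invariant
lemma pvDecision_iff (key : String) (ded : List String) (allT singleT : PySem.Set String)
    (hA : ∀ t, t ∈ allT ↔ ∃ e ∈ ded, t ∈ pvTokens (PySem.Str.lower e))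
    (hS : ∀ t, t ∈ singleT ↔ ∃ e ∈ ded, pvTokens (PySem.Str.lower e) = [t])
    (hk : ∀ e ∈ ded, key ≠ PySem.Str.lower e) :
    pvRedundantA key (pvTokens key) ded = true ↔
      ((pvTokens key).length = 1 ∧ PySem.Set.contains allT ((pvTokens key).headD "") = true) ∨
        PySem.Set.inter (pvTokens key) singleT ≠ [] := by
  rw [pvRedundantA_iff]
  constructor
  · rintro ⟨e, he, h | ⟨hlen, hsub⟩ | ⟨hlen, hsub⟩⟩
    · exact absurd h (hk e he)
    · refine Or.inl ⟨hlen, ?_⟩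
      rw [PySem.Set.contains_iff, hA]
      exact ⟨e, he, (pvSingleton_subset_iff _ _ hlen).mp hsub⟩
    · rcases List.length_eq_one_iff.mp hlen with ⟨a, ha⟩
      refine Or.inr (List.ne_nil_of_mem (a := a) ?_)
      rw [PySem.Set.mem_inter]
      constructor
      · have := (pvSingleton_subset_iff _ _ hlen).mp hsub
        rw [ha] at this; simpa using this
      · rw [hS]; exact ⟨e, he, ha⟩
  · rintro (⟨hlen, hmem⟩ | hne)
    · rw [PySem.Set.contains_iff, hA] at hmem
      rcases hmem with ⟨e, he, hte⟩
      exact ⟨e, he, Or.inr (Or.inl ⟨hlen, (pvSingleton_subset_iff _ _ hlen).mpr hte⟩)⟩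
    · rcases List.exists_mem_of_ne_nil _ hne with ⟨y, hy⟩
      rw [PySem.Set.mem_inter] at hy
      rcases hy with ⟨hyk, hys⟩
      rcases (hS y).mp hys with ⟨e, he, hse⟩
      have hlen : (pvTokens (PySem.Str.lower e)).length = 1 := by rw [hse]; rfl
      refine ⟨e, he, Or.inr (Or.inr ⟨hlen, ?_⟩)⟩
      rw [pvSingleton_subset_iff _ _ hlen, hse]
      simpa using hyk

lemma pvStep_equiv (seen : PySem.Set String) (ded : List String)
    (allT singleT : PySem.Set String) (part : Option String)
    (h : pvInv seen ded allT singleT) :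
    pvStepB (seen, ded, allT, singleT) part =
      ((pvStepA (seen, ded) part).1, (pvStepA (seen, ded) part).2,
        (pvStepB (seen, ded, allT, singleT) part).2.2) ∧
    pvInv (pvStepA (seen, ded) part).1 (pvStepA (seen, ded) part).2
      (pvStepB (seen, ded, allT, singleT) part).2.2.1
      (pvStepB (seen, ded, allT, singleT) part).2.2.2 := by
  obtain ⟨hseen, hA, hS⟩ := h
  cases part with
  | none => exact ⟨rfl, hseen, hA, hS⟩
  | some p =>
    simp only [pvStepA, pvStepB]
    by_cases hp : p = ""
    · simp only [if_pos hp]; exact ⟨by trivial, hseen, hA, hS⟩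
    · simp only [if_neg hp]
      by_cases ht : PySem.Str.strip p = ""
      · simp only [if_pos ht]; exact ⟨by trivial, hseen, hA, hS⟩
      · simp only [if_neg ht]
        by_cases hc : PySem.Set.contains seen (PySem.Str.lower (PySem.Str.strip p)) = true
        · simp only [if_pos hc]; exact ⟨by trivial, hseen, hA, hS⟩
        · simp only [if_neg hc]
          have hnotin : PySem.Str.lower (PySem.Str.strip p) ∉ seen := by
            rw [← PySem.Set.contains_iff]; exact hc
          have hk : ∀ e ∈ ded, PySem.Str.lower (PySem.Str.strip p) ≠ PySem.Str.lower e := by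
            intro e he heq
            exact hnotin (by rw [hseen, heq]; exact List.mem_map_of_mem he)
          have hdec := pvDecision_iff (PySem.Str.lower (PySem.Str.strip p)) ded allT singleT hA hS hk
          by_cases h1 : (pvTokens (PySem.Str.lower (PySem.Str.strip p))).length = 1 ∧
              PySem.Set.contains allT ((pvTokens (PySem.Str.lower (PySem.Str.strip p))).headD "") = true
          · have hr : pvRedundantA (PySem.Str.lower (PySem.Str.strip p))
                (pvTokens (PySem.Str.lower (PySem.Str.strip p))) ded = true := hdec.mpr (Or.inl h1)
            simp only [if_pos h1, if_pos hr]
            exact ⟨by trivial, hseen, hA, hS⟩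
          · simp only [if_neg h1]
            by_cases h2 : PySem.Set.inter (pvTokens (PySem.Str.lower (PySem.Str.strip p))) singleT ≠ []
            · have hr : pvRedundantA (PySem.Str.lower (PySem.Str.strip p))
                  (pvTokens (PySem.Str.lower (PySem.Str.strip p))) ded = true := hdec.mpr (Or.inr h2)
              simp only [if_pos h2, if_pos hr]
              exact ⟨by trivial, hseen, hA, hS⟩
            · have hr : ¬ pvRedundantA (PySem.Str.lower (PySem.Str.strip p))
                  (pvTokens (PySem.Str.lower (PySem.Str.strip p))) ded = true := by
                intro hh
                rcases hdec.mp hh with hh1 | hh2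
                · exact h1 hh1
                · exact h2 hh2
              simp only [if_neg h2, if_neg hr]
              refine ⟨by trivial, ?_, ?_, ?_⟩
              · rw [PySem.Set.add_of_not_mem hnotin, hseen, List.map_append]
                rfl
              · intro t
                rw [PySem.Set.mem_update]
                constructor
                · rintro (h | h)
                  · rcases (hA t).mp h with ⟨e, he, hte⟩
                    exact ⟨e, List.mem_append_left _ he, hte⟩
                  · exact ⟨PySem.Str.strip p, List.mem_append_right _ (List.mem_singleton_self _), h⟩
                · rintro ⟨e, he, hte⟩
                  rcases List.mem_append.mp he with he' | he'
                  · exact Or.inl ((hA t).mpr ⟨e, he', hte⟩)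
                  · rw [List.mem_singleton] at he'
                    subst he'
                    exact Or.inr hte
              · intro t
                by_cases hlen : (pvTokens (PySem.Str.lower (PySem.Str.strip p))).length = 1
                · rw [if_pos hlen, PySem.Set.mem_update]
                  rcases List.length_eq_one_iff.mp hlen with ⟨a, ha⟩
                  constructor
                  · rintro (h | h)
                    · rcases (hS t).mp h with ⟨e, he, hte⟩
                      exact ⟨e, List.mem_append_left _ he, hte⟩
                    · refine ⟨PySem.Str.strip p, List.mem_append_right _ (List.mem_singleton_self _), ?_⟩
                      rw [ha] at h ⊢
                      rw [List.mem_singleton] at h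
                      rw [h]
                  · rintro ⟨e, he, hte⟩
                    rcases List.mem_append.mp he with he' | he'
                    · exact Or.inl ((hS t).mpr ⟨e, he', hte⟩)
                    · rw [List.mem_singleton] at he'
                      subst he'
                      right
                      rw [hte]; exact List.mem_singleton_self _
                · rw [if_neg hlen]
                  constructor
                  · intro h
                    rcases (hS t).mp h with ⟨e, he, hte⟩
                    exact ⟨e, List.mem_append_left _ he, hte⟩
                  · rintro ⟨e, he, hte⟩
                    rcases List.mem_append.mp he with he' | he'
                    · exact (hS t).mpr ⟨e, he', hte⟩
                    · rw [List.mem_singleton] at he'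
                      subst he'
                      exact absurd (by rw [hte]; rfl) hlen

lemma pvFold_equiv (parts : List (Option String)) :
    ∀ (seen : PySem.Set String) (ded : List String) (allT singleT : PySem.Set String),
      pvInv seen ded allT singleT →
      (parts.foldl pvStepB (seen, ded, allT, singleT)).2.1 =
        (parts.foldl pvStepA (seen, ded)).2 := by
  induction parts with
  | nil => intro _ _ _ _ _; rfl
  | cons part rest ih =>
    intro seen ded allT singleT h
    rw [List.foldl_cons, List.foldl_cons]
    obtain ⟨heq, hinv⟩ := pvStep_equiv seen ded allT singleT part h
    rw [heq]
    exact ih (pvStepA (seen, ded) part).1 (pvStepA (seen, ded) part).2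
      (pvStepB (seen, ded, allT, singleT) part).2.2.1
      (pvStepB (seen, ded, allT, singleT) part).2.2.2 hinv

-- ===== VERDICT (by name: the statement is the Claim_ definition above) =====
theorem dedupe_query_parts_py_spec : Claim_equal_dedupe_query_parts_py := by
  intro parts _
  unfold Spec_dedupe_query_parts_py dedupe_query_parts_py dedupe_query_parts_py_alt
  symm
  apply pvFold_equiv
  refine ⟨rfl, ?_, ?_⟩ <;> intro t <;> simp [PySem.Set.empty]
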